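-- pv_equiv track=rewrite | github.com/yahelihol/solve-Hidato_hex_puzzle_algorithm | hex_logic_functions.py | is_remaining_area_connected
-- ===== SOURCE A (Python) =====
-- def get_adjacent_hexes(cube, board):
--     directions = [
--         (1, -1, 0), (-1, 1, 0),  # x-direction
--         (1, 0, -1), (-1, 0, 1),  # y-direction
--         (0, 1, -1), (0, -1, 1)   # z-direction
--     ]
--
--     adjacent_hexes = [(cube[0] + d[0], cube[1] + d[1], cube[2] + d[2]) for d in directions]
--     return [hex for hex in adjacent_hexes if hex in board.keys()]
--
-- def is_remaining_area_connected(board, visited, current_step, found):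
--     # Cells that can still be visited in the future:
--     def is_future_usable(cell):
--         val = board[cell]
--         return (
--             cell not in visited and
--             (
--                 val == 0 or            # empty
--                 (val > current_step and val in found)  # scheduled for later
--             )
--         )
--
--     usable = {cell for cell in board if is_future_usable(cell)}
--     if not usable:
--         return True
--
--     # Start flood fill from any usable cell
--     start = next(iter(usable))
--     reachable = set()
--     stack = [start]
--
--     while stack:
--         current = stack.pop()
--         if current in reachable:
--             continue
--         reachable.add(current)
--         for neighbor in get_adjacent_hexes(current, board):
--             if neighbor in usable and neighbor not in reachable:
--                 stack.append(neighbor)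
--
--     return len(reachable) == len(usable)
-- ===== SOURCE B (Python) =====
-- def is_remaining_area_connected(board, visited, current_step, found):
--     def is_future_usable(cell):
--         val = board[cell]
--         return (
--             cell not in visited and
--             (val == 0 or (val > current_step and val in found))
--         )
--
--     usable = [cell for cell in board if is_future_usable(cell)]
--     if not usable:
--         return True
--
--     dirs = [(1, -1, 0), (-1, 1, 0), (1, 0, -1), (-1, 0, 1), (0, 1, -1), (0, -1, 1)]
--     reach = {usable[0]}
--     grew = True
--     while grew:
--         grew = False
--         for (x, y, z) in usable:
--             if (x, y, z) not in reach and any((x + dx, y + dy, z + dz) in reach for dx, dy, dz in dirs):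
--                 reach.add((x, y, z))
--                 grew = True
--     return all(c in reach for c in usable)
-- ===== Notes on version B (the rewrite author's own statement) =====
-- stated objective: alternative
-- what changed: Replaces A's explicit-stack DFS flood fill plus size comparison with a stack-free fixpoint saturation: repeated whole-list sweeps add any unreached usable cell adjacent to the reached set until a sweep adds nothing, then it checks that every usable cell was reached.
import Mathlib
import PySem

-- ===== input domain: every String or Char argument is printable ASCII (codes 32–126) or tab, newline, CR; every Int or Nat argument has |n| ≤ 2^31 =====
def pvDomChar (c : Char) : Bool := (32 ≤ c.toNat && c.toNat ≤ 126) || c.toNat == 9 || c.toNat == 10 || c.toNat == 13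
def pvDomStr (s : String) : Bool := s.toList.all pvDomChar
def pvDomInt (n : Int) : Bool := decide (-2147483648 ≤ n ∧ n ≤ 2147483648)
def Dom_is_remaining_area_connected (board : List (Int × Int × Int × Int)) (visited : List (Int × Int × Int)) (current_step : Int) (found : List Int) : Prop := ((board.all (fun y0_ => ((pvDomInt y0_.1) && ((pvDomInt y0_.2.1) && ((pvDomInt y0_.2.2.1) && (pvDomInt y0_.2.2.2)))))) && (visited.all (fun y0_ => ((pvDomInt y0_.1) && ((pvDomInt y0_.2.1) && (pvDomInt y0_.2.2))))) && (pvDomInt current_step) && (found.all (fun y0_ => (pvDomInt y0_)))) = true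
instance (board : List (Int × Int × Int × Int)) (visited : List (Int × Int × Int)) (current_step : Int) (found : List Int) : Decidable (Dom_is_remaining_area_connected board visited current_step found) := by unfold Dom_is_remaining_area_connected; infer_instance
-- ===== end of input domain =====

-- B replaces A's explicit-stack DFS flood fill (plus size comparison) with a stack-free fixpoint
-- saturation — repeated whole-list sweeps over the usable cells until a sweep adds nothing —
-- then checks every usable cell was reached; same return value, no speed claim.

-- ===== PORT A =====
-- the six cube directions (shared literal of both Pythons)
def pvDirs : List (Int × Int × Int) :=
  [(1, -1, 0), (-1, 1, 0), (1, 0, -1), (-1, 0, 1), (0, 1, -1), (0, -1, 1)]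

-- (cube[0]+d[0], cube[1]+d[1], cube[2]+d[2])
def pvAdd (u d : Int × Int × Int) : Int × Int × Int :=
  (u.1 + d.1, u.2.1 + d.2.1, u.2.2 + d.2.2)

def get_adjacent_hexes (cube : Int × Int × Int) (board : PySem.Dict (Int × Int × Int) Int) :
    List (Int × Int × Int) :=
  (pvDirs.map (fun d => pvAdd cube d)).filter (fun h => board.contains h)

-- is_future_usable, identical in A and in B (B copies A's predicate verbatim); the usable set is a
-- set comprehension over the dict's (unique, insertion-ordered) keys
def pvUsable (board : PySem.Dict (Int × Int × Int) Int) (visited : List (Int × Int × Int))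
    (current_step : Int) (found : List Int) : List (Int × Int × Int) :=
  board.keys.filter (fun cell =>
    !(visited.contains cell) &&
      (board.getD cell 0 == 0 ||
        (current_step < board.getD cell 0 && found.contains (board.getD cell 0))))

-- A's while-stack loop; stack head = Python's list end (pop/append site); fuel only makes the
-- recursion structural — 7*|usable|+1 steps are proved sufficient below (pvDfsA_spec)
def pvDfsA (board : PySem.Dict (Int × Int × Int) Int) (usable : List (Int × Int × Int)) :
    Nat → List (Int × Int × Int) → List (Int × Int × Int) → List (Int × Int × Int)
  | _, [], reachable => reachable
  | 0, _ :: _, reachable => reachable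
  | fuel + 1, current :: stack, reachable =>
    if reachable.contains current then
      pvDfsA board usable fuel stack reachable
    else
      let reachable' := reachable ++ [current]
      let pushes := (get_adjacent_hexes current board).filter
        (fun neighbor => usable.contains neighbor && !(reachable'.contains neighbor))
      pvDfsA board usable fuel (pushes.reverse ++ stack) reachable'

def is_remaining_area_connected (board : List (Int × Int × Int × Int)) (visited : List (Int × Int × Int)) (current_step : Int) (found : List Int) : Bool :=
  let bd := PySem.Dict.ofList (board.map (fun t => ((t.1, t.2.1, t.2.2.1), t.2.2.2)))
  let usable := pvUsable bd visited current_step found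
  match usable with
  | [] => true
  | start :: _ =>
    let reachable := pvDfsA bd usable (7 * usable.length + 1) [start] []
    reachable.length == usable.length

-- ===== PORT B =====
-- one sweep of B's inner for-loop: add every unreached usable cell with a neighbour in reach
def pvSweepB (usable : List (Int × Int × Int)) (st : List (Int × Int × Int) × Bool) :
    List (Int × Int × Int) × Bool :=
  usable.foldl (fun st c =>
    if !(st.1.contains c) && pvDirs.any (fun d => st.1.contains (pvAdd c d)) then
      (st.1 ++ [c], true)
    else st) st

-- B's while-grew loop; fuel |usable| makes it structural and is proved sufficient below
def pvLoopB (usable : List (Int × Int × Int)) :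
    Nat → List (Int × Int × Int) → List (Int × Int × Int)
  | 0, reach => reach
  | fuel + 1, reach =>
    let st := pvSweepB usable (reach, false)
    if st.2 then pvLoopB usable fuel st.1 else st.1

def is_remaining_area_connected_alt (board : List (Int × Int × Int × Int)) (visited : List (Int × Int × Int)) (current_step : Int) (found : List Int) : Bool :=
  let bd := PySem.Dict.ofList (board.map (fun t => ((t.1, t.2.1, t.2.2.1), t.2.2.2)))
  let usable := pvUsable bd visited current_step found
  match usable with
  | [] => true
  | start :: _ =>
    let reach := pvLoopB usable usable.length [start]
    usable.all (fun c => reach.contains c)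

-- ===== PRECONDITION & SPEC =====
def Spec_is_remaining_area_connected (board : List (Int × Int × Int × Int)) (visited : List (Int × Int × Int)) (current_step : Int) (found : List Int) (out : Bool) : Prop := out = is_remaining_area_connected_alt board visited current_step found
instance (board : List (Int × Int × Int × Int)) (visited : List (Int × Int × Int)) (current_step : Int) (found : List Int) (out : Bool) : Decidable (Spec_is_remaining_area_connected board visited current_step found out) := by unfold Spec_is_remaining_area_connected; infer_instance

-- ===== CLAIM (what is proved, stated in full; the proofs are below) =====
def Claim_equal_is_remaining_area_connected : Prop := ∀ (board : List (Int × Int × Int × Int)) (visited : List (Int × Int × Int)) (current_step : Int) (found : List Int), Dom_is_remaining_area_connected board visited current_step found → Spec_is_remaining_area_connected board visited current_step found (is_remaining_area_connected board visited current_step found)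

-- ===== LEMMAS AND PROOFS =====

-- adjacency of two cells, and reachability inside `usable` from `start`
def pvAdj (u v : Int × Int × Int) : Prop := ∃ d ∈ pvDirs, v = pvAdd u d

inductive pvReach (usable : List (Int × Int × Int)) (start : Int × Int × Int) :
    (Int × Int × Int) → Prop
  | base : pvReach usable start start
  | step {u v : Int × Int × Int} : pvReach usable start u → v ∈ usable → pvAdj u v →
      pvReach usable start v

theorem pvAdj_symm {u v : Int × Int × Int} (h : pvAdj u v) : pvAdj v u := by
  obtain ⟨d, hd, rfl⟩ := h
  simp only [pvDirs, List.mem_cons, List.not_mem_nil, or_false] at hd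
  rcases hd with rfl | rfl | rfl | rfl | rfl | rfl
  · exact ⟨(-1, 1, 0), by simp [pvDirs], by simp [pvAdd]⟩
  · exact ⟨(1, -1, 0), by simp [pvDirs], by simp [pvAdd]⟩
  · exact ⟨(-1, 0, 1), by simp [pvDirs], by simp [pvAdd]⟩
  · exact ⟨(1, 0, -1), by simp [pvDirs], by simp [pvAdd]⟩
  · exact ⟨(0, -1, 1), by simp [pvDirs], by simp [pvAdd]⟩
  · exact ⟨(0, 1, -1), by simp [pvDirs], by simp [pvAdd]⟩

-- two nodup lists, one included in the other: equal lengths ↔ mutual inclusion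
theorem pv_len_eq_iff_superset {F u : List (Int × Int × Int)} (hF : F.Nodup) (hu : u.Nodup)
    (hsub : ∀ c ∈ F, c ∈ u) : (F.length = u.length ↔ ∀ c ∈ u, c ∈ F) := by
  constructor
  · intro hlen c hc
    have hs : F.toFinset ⊆ u.toFinset := by
      intro x hx; rw [List.mem_toFinset] at *; exact hsub x hx
    have hcard : u.toFinset.card ≤ F.toFinset.card := by
      rw [List.toFinset_card_of_nodup hF, List.toFinset_card_of_nodup hu, hlen]
    have := Finset.eq_of_subset_of_card_le hs hcard
    have : c ∈ F.toFinset := by rw [this, List.mem_toFinset]; exact hc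
    rwa [List.mem_toFinset] at this
  · intro hsup
    have : F.toFinset = u.toFinset := by
      apply Finset.Subset.antisymm <;> intro x hx <;> rw [List.mem_toFinset] at * <;>
        [exact hsub x hx; exact hsup x hx]
    rw [← List.toFinset_card_of_nodup hF, ← List.toFinset_card_of_nodup hu, this]

theorem pv_nodup_subset_len {F u : List (Int × Int × Int)} (hF : F.Nodup) (hu : u.Nodup)
    (hsub : ∀ c ∈ F, c ∈ u) : F.length ≤ u.length := by
  calc F.length = F.toFinset.card := (List.toFinset_card_of_nodup hF).symm
    _ ≤ u.toFinset.card := Finset.card_le_card (by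
        intro x hx; rw [List.mem_toFinset] at *; exact hsub x hx)
    _ = u.length := List.toFinset_card_of_nodup hu

theorem pv_usable_nodup (bd : PySem.Dict (Int × Int × Int) Int) (visited : List (Int × Int × Int))
    (cs : Int) (found : List Int) (hk : bd.keys.Nodup) :
    (pvUsable bd visited cs found).Nodup := hk.filter _

theorem pv_usable_mem_keys {bd : PySem.Dict (Int × Int × Int) Int}
    {visited : List (Int × Int × Int)} {cs : Int} {found : List Int} {c : Int × Int × Int}
    (h : c ∈ pvUsable bd visited cs found) : bd.contains c = true := by
  rw [PySem.Dict.contains_iff_mem_keys]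
  exact (List.mem_filter.mp h).1

-- ---------- B side: the sweep ----------
theorem pvSweep_go (usable : List (Int × Int × Int)) (start : Int × Int × Int) :
    ∀ (l r : List (Int × Int × Int)) (g : Bool),
    (∀ c ∈ l, c ∈ usable) → r.Nodup → (∀ c ∈ r, pvReach usable start c) →
    ((pvSweepB l (r, g)).1.Nodup
    ∧ (∃ t, (pvSweepB l (r, g)).1 = r ++ t)
    ∧ (∀ c ∈ (pvSweepB l (r, g)).1, pvReach usable start c)
    ∧ (∀ c ∈ (pvSweepB l (r, g)).1, c ∈ r ∨ c ∈ l)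
    ∧ (g = true → (pvSweepB l (r, g)).2 = true)
    ∧ (g = false → (pvSweepB l (r, g)).2 = true → r.length < (pvSweepB l (r, g)).1.length)
    ∧ (g = false → (pvSweepB l (r, g)).2 = false →
        (pvSweepB l (r, g)).1 = r ∧ ∀ c ∈ l, c ∈ r ∨ ∀ d ∈ pvDirs, pvAdd c d ∉ r)) := by
  intro l
  induction l with
  | nil =>
    intro r g _ hnd hP
    refine ⟨hnd, ⟨[], by simp [pvSweepB]⟩, ?_, ?_, ?_, ?_, ?_⟩ <;>
      simp [pvSweepB] at * <;> tauto
  | cons c l ih =>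
    intro r g hl hnd hP
    have hcu : c ∈ usable := hl c (by simp)
    have hl' : ∀ x ∈ l, x ∈ usable := fun x hx => hl x (by simp [hx])
    have hstep : pvSweepB (c :: l) (r, g) = pvSweepB l
        (if (!(r.contains c) && pvDirs.any fun d => r.contains (pvAdd c d)) = true
         then (r ++ [c], true) else (r, g)) := rfl
    rw [hstep]
    by_cases hcond : (!(r.contains c) && pvDirs.any (fun d => r.contains (pvAdd c d))) = true
    · -- c is added
      rw [if_pos hcond]
      have hnotmem : c ∉ r := by
        simp only [Bool.and_eq_true, Bool.not_eq_true', List.contains_iff_mem] at hcond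
        simpa using hcond.1
      have hnbr : ∃ d ∈ pvDirs, pvAdd c d ∈ r := by
        simp only [Bool.and_eq_true, List.any_eq_true, List.contains_iff_mem] at hcond
        exact hcond.2
      have hPc : pvReach usable start c := by
        obtain ⟨d, hd, hmem⟩ := hnbr
        exact pvReach.step (hP _ hmem) hcu (pvAdj_symm ⟨d, hd, rfl⟩)
      have hdisj : r.Disjoint [c] := by
        intro x hx hxc; rw [List.mem_singleton] at hxc; exact hnotmem (hxc ▸ hx)
      have hnd' : (r ++ [c]).Nodup := hnd.append (List.nodup_singleton c) hdisj
      have hP' : ∀ x ∈ r ++ [c], pvReach usable start x := by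
        intro x hx; rcases List.mem_append.mp hx with hx | hx
        · exact hP x hx
        · simp at hx; subst hx; exact hPc
      obtain ⟨h1, ⟨t, h2⟩, h3, h4, h5, _, _⟩ := ih (r ++ [c]) true hl' hnd' hP'
      refine ⟨h1, ⟨c :: t, by rw [h2]; simp⟩, h3, ?_, fun _ => h5 rfl, ?_, ?_⟩
      · intro x hx
        rcases h4 x hx with hx' | hx'
        · rcases List.mem_append.mp hx' with h | h
          · exact Or.inl h
          · simp at h; subst h; simp
        · simp [hx']
      · intro _ _
        have : r.length + 1 ≤ (r ++ [c]).length := by simp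
        obtain ⟨t', ht'⟩ : ∃ t', (pvSweepB l (r ++ [c], true)).1 = (r ++ [c]) ++ t' := ⟨t, h2⟩
        rw [ht']; simp only [List.length_append, List.length_cons]; omega
      · intro _ hfalse
        exact absurd (h5 rfl) (by simp [hfalse])
    · -- c is skipped
      rw [if_neg hcond]
      obtain ⟨h1, h2, h3, h4, h5, h6, h7⟩ := ih r g hl' hnd hP
      refine ⟨h1, h2, h3, ?_, h5, h6, ?_⟩
      · intro x hx; rcases h4 x hx with h | h
        · exact Or.inl h
        · exact Or.inr (by simp [h])
      · intro hg hfl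
        obtain ⟨he, hcl⟩ := h7 hg hfl
        refine ⟨he, ?_⟩
        intro x hx
        rcases List.mem_cons.mp hx with rfl | hx'
        · -- the skip condition says: x ∈ r or no neighbour of x is in r
          simp only [Bool.and_eq_true, Bool.not_eq_true', List.any_eq_true,
            List.contains_iff_mem, not_and] at hcond
          by_cases hxr : x ∈ r
          · exact Or.inl hxr
          · right
            intro d hd hmem
            exact hcond (by simp [hxr]) ⟨d, hd, hmem⟩
        · exact hcl x hx'

-- ---------- B side: the saturation loop ----------
theorem pvLoopB_spec (usable : List (Int × Int × Int)) (start : Int × Int × Int)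
    (hund : usable.Nodup) :
    ∀ (fuel : Nat) (r : List (Int × Int × Int)),
    r.Nodup → (∀ c ∈ r, c ∈ usable) → (∀ c ∈ r, pvReach usable start c) →
    usable.length ≤ fuel + r.length →
    ((pvLoopB usable fuel r).Nodup
    ∧ (∀ c ∈ r, c ∈ pvLoopB usable fuel r)
    ∧ (∀ c ∈ pvLoopB usable fuel r, c ∈ usable)
    ∧ (∀ c ∈ pvLoopB usable fuel r, pvReach usable start c)
    ∧ (∀ c ∈ usable, c ∉ pvLoopB usable fuel r →
        ∀ d ∈ pvDirs, pvAdd c d ∉ pvLoopB usable fuel r)) := by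
  intro fuel
  induction fuel with
  | zero =>
    intro r hnd hsub hP hfuel
    simp only [pvLoopB]
    have hle : r.length ≤ usable.length := pv_nodup_subset_len hnd hund hsub
    have hlen : r.length = usable.length := by omega
    have hall : ∀ c ∈ usable, c ∈ r := (pv_len_eq_iff_superset hnd hund hsub).mp hlen
    exact ⟨hnd, fun c hc => hc, hsub, hP, fun c hc hnc => absurd (hall c hc) hnc⟩
  | succ fuel ih =>
    intro r hnd hsub hP hfuel
    simp only [pvLoopB]
    obtain ⟨h1, ⟨t, h2⟩, h3, h4, _, h6, h7⟩ :=
      pvSweep_go usable start usable r false (fun c hc => hc) hnd hP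
    by_cases hfl : (pvSweepB usable (r, false)).2 = true
    · rw [if_pos hfl]
      have hgrow := h6 rfl hfl
      have hsub' : ∀ c ∈ (pvSweepB usable (r, false)).1, c ∈ usable := by
        intro c hc; rcases h4 c hc with h | h; exacts [hsub c h, h]
      obtain ⟨g1, g2, g3, g4, g5⟩ := ih (pvSweepB usable (r, false)).1 h1 hsub' h3 (by omega)
      exact ⟨g1, fun c hc => g2 c (by rw [h2]; exact List.mem_append_left _ hc), g3, g4, g5⟩
    · rw [if_neg hfl]
      obtain ⟨he, hcl⟩ := h7 rfl (by simpa using hfl)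
      rw [he]
      refine ⟨hnd, fun c hc => hc, hsub, hP, ?_⟩
      intro c hc hnc d hd
      rcases hcl c hc with h | h
      · exact absurd h hnc
      · exact h d hd

-- ---------- A side: the DFS ----------
theorem pvDfsA_spec (bd : PySem.Dict (Int × Int × Int) Int) (usable : List (Int × Int × Int))
    (start : Int × Int × Int) (hund : usable.Nodup)
    (hkeys : ∀ c ∈ usable, bd.contains c = true) :
    ∀ (fuel : Nat) (stack reach : List (Int × Int × Int)),
    reach.Nodup → (∀ c ∈ reach, c ∈ usable) → (∀ c ∈ stack, c ∈ usable) →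
    (∀ c ∈ reach, pvReach usable start c) → (∀ c ∈ stack, pvReach usable start c) →
    (∀ r ∈ reach, ∀ v ∈ usable, pvAdj r v → v ∈ reach ∨ v ∈ stack) →
    7 * (usable.length - reach.length) + stack.length ≤ fuel →
    ((pvDfsA bd usable fuel stack reach).Nodup
    ∧ (∀ c ∈ pvDfsA bd usable fuel stack reach, c ∈ usable)
    ∧ (∀ c ∈ pvDfsA bd usable fuel stack reach, pvReach usable start c)
    ∧ (∀ c ∈ reach, c ∈ pvDfsA bd usable fuel stack reach)
    ∧ (∀ c ∈ stack, c ∈ pvDfsA bd usable fuel stack reach)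
    ∧ (∀ r ∈ pvDfsA bd usable fuel stack reach, ∀ v ∈ usable, pvAdj r v →
        v ∈ pvDfsA bd usable fuel stack reach)) := by
  intro fuel
  induction fuel with
  | zero =>
    intro stack reach hnd hrsub hssub hrP hsP hedge hfuel
    match stack with
    | [] =>
      simp only [pvDfsA]
      exact ⟨hnd, hrsub, hrP, fun c hc => hc, by simp, fun r hr v hv hadj => by
        rcases hedge r hr v hv hadj with h | h; exacts [h, absurd h (by simp)]⟩
    | c :: s => simp only [List.length_cons] at hfuel; omega
  | succ fuel ih =>
    intro stack reach hnd hrsub hssub hrP hsP hedge hfuel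
    match stack with
    | [] =>
      simp only [pvDfsA]
      exact ⟨hnd, hrsub, hrP, fun c hc => hc, by simp, fun r hr v hv hadj => by
        rcases hedge r hr v hv hadj with h | h; exacts [h, absurd h (by simp)]⟩
    | current :: stack =>
      simp only [pvDfsA]
      by_cases hmem : reach.contains current = true
      · rw [if_pos hmem]
        have hcur : current ∈ reach := List.contains_iff_mem.mp hmem
        have hedge' : ∀ r ∈ reach, ∀ v ∈ usable, pvAdj r v → v ∈ reach ∨ v ∈ stack := by
          intro r hr v hv hadj
          rcases hedge r hr v hv hadj with h | h
          · exact Or.inl h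
          · rcases List.mem_cons.mp h with rfl | h'
            · exact Or.inl hcur
            · exact Or.inr h'
        obtain ⟨g1, g2, g3, g4, g5, g6⟩ := ih stack reach hnd hrsub
          (fun c hc => hssub c (by simp [hc])) hrP (fun c hc => hsP c (by simp [hc]))
          hedge' (by simp only [List.length_cons] at hfuel; omega)
        exact ⟨g1, g2, g3, g4, fun c hc => by
          rcases List.mem_cons.mp hc with rfl | h
          · exact g4 _ hcur
          · exact g5 c h, g6⟩
      · rw [if_neg hmem]
        have hcurnot : current ∉ reach := fun h => hmem (List.contains_iff_mem.mpr h)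
        have hcuru : current ∈ usable := hssub current (by simp)
        have hcurP : pvReach usable start current := hsP current (by simp)
        set reach' := reach ++ [current] with hreach'
        set pushes := (get_adjacent_hexes current bd).filter
          (fun neighbor => usable.contains neighbor && !(reach'.contains neighbor)) with hpushes
        have hdisj : reach.Disjoint [current] := by
          intro x hx hxc; rw [List.mem_singleton] at hxc; exact hcurnot (hxc ▸ hx)
        have hnd' : reach'.Nodup := hnd.append (List.nodup_singleton current) hdisj
        have hrsub' : ∀ c ∈ reach', c ∈ usable := by
          intro c hc; rcases List.mem_append.mp hc with h | h
          · exact hrsub c h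
          · simp at h; subst h; exact hcuru
        have hrP' : ∀ c ∈ reach', pvReach usable start c := by
          intro c hc; rcases List.mem_append.mp hc with h | h
          · exact hrP c h
          · simp at h; subst h; exact hcurP
        have hpush_mem : ∀ c ∈ pushes, c ∈ usable ∧ pvAdj current c := by
          intro c hc
          rw [hpushes, List.mem_filter] at hc
          obtain ⟨hadjm, hcond⟩ := hc
          simp only [get_adjacent_hexes, List.mem_filter, List.mem_map] at hadjm
          obtain ⟨⟨d, hd, rfl⟩, _⟩ := hadjm
          simp only [Bool.and_eq_true, List.contains_iff_mem] at hcond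
          exact ⟨hcond.1, ⟨d, hd, rfl⟩⟩
        have hssub' : ∀ c ∈ pushes.reverse ++ stack, c ∈ usable := by
          intro c hc
          rcases List.mem_append.mp hc with h | h
          · exact (hpush_mem c (List.mem_reverse.mp h)).1
          · exact hssub c (by simp [h])
        have hsP' : ∀ c ∈ pushes.reverse ++ stack, pvReach usable start c := by
          intro c hc
          rcases List.mem_append.mp hc with h | h
          · obtain ⟨hu, hadj⟩ := hpush_mem c (List.mem_reverse.mp h)
            exact pvReach.step hcurP hu hadj
          · exact hsP c (by simp [h])
        have hedge' : ∀ r ∈ reach', ∀ v ∈ usable, pvAdj r v →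
            v ∈ reach' ∨ v ∈ pushes.reverse ++ stack := by
          intro r hr v hv hadj
          rcases List.mem_append.mp hr with hr | hr
          · rcases hedge r hr v hv hadj with h | h
            · exact Or.inl (List.mem_append_left _ h)
            · rcases List.mem_cons.mp h with rfl | h'
              · exact Or.inl (by simp [hreach'])
              · exact Or.inr (List.mem_append_right _ h')
          · simp at hr; subst hr
            by_cases hvr : v ∈ reach'
            · exact Or.inl hvr
            · right
              apply List.mem_append_left
              rw [List.mem_reverse, hpushes, List.mem_filter]
              obtain ⟨d, hd, rfl⟩ := hadj
              constructor
              · simp only [get_adjacent_hexes, List.mem_filter, List.mem_map]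
                exact ⟨⟨d, hd, rfl⟩, hkeys _ hv⟩
              · simp [List.contains_iff_mem, hv, hvr]
        have hlen' : reach'.length ≤ usable.length := pv_nodup_subset_len hnd' hund hrsub'
        have hpushlen : pushes.length ≤ 6 := by
          calc pushes.length ≤ (get_adjacent_hexes current bd).length := List.length_filter_le _ _
            _ ≤ (pvDirs.map (fun d => pvAdd current d)).length := List.length_filter_le _ _
            _ = 6 := by simp [pvDirs]
        have hfuel' : 7 * (usable.length - reach'.length) + (pushes.reverse ++ stack).length ≤ fuel := by
          have h1 : reach'.length = reach.length + 1 := by simp [hreach']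
          have h2 : (pushes.reverse ++ stack).length = pushes.length + stack.length := by simp
          have h3 : reach.length + 1 ≤ usable.length := h1 ▸ hlen'
          simp only [List.length_cons] at hfuel
          omega
        obtain ⟨g1, g2, g3, g4, g5, g6⟩ := ih (pushes.reverse ++ stack) reach' hnd' hrsub'
          hssub' hrP' hsP' hedge' hfuel'
        refine ⟨g1, g2, g3, fun c hc => g4 c (List.mem_append_left _ hc), ?_, g6⟩
        intro c hc
        rcases List.mem_cons.mp hc with rfl | h
        · exact g4 c (by simp [hreach'])
        · exact g5 c (List.mem_append_right _ h)

-- the two branch computations agree for a non-empty usable list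
theorem pv_cons_eq (bd : PySem.Dict (Int × Int × Int) Int) (start : Int × Int × Int)
    (rest : List (Int × Int × Int)) (hund : (start :: rest).Nodup)
    (hkeys : ∀ c ∈ start :: rest, bd.contains c = true) :
    (((pvDfsA bd (start :: rest) (7 * (start :: rest).length + 1) [start] []).length ==
        (start :: rest).length) : Bool)
    = (start :: rest).all
        (fun c => (pvLoopB (start :: rest) (start :: rest).length [start]).contains c) := by
  have hstart : start ∈ start :: rest := by simp
  obtain ⟨a1, a2, a3, _, a5, a6⟩ := pvDfsA_spec bd (start :: rest) start hund hkeys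
    (7 * (start :: rest).length + 1) [start] [] (by simp) (by simp) (by simpa using hstart)
    (by simp) (by simp [pvReach.base]) (by simp) (by simp)
  obtain ⟨b1, b2, b3, b4, b5⟩ := pvLoopB_spec (start :: rest) start hund
    (start :: rest).length [start] (by simp) (by simpa using hstart)
    (by simp [pvReach.base]) (by simp)
  set F := pvDfsA bd (start :: rest) (7 * (start :: rest).length + 1) [start] [] with hF
  set S := pvLoopB (start :: rest) (start :: rest).length [start] with hS
  have hFreach : ∀ c, c ∈ F ↔ pvReach (start :: rest) start c := by
    intro c
    refine ⟨a3 c, fun h => ?_⟩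
    induction h with
    | base => exact a5 start (by simp)
    | step hu hv hadj ihc => exact a6 _ ihc _ hv hadj
  have hSreach : ∀ c, c ∈ S ↔ pvReach (start :: rest) start c := by
    intro c
    refine ⟨b4 c, fun h => ?_⟩
    induction h with
    | base => exact b2 start (by simp)
    | step hu hv hadj ihc =>
      rename_i u v
      by_contra hnc
      obtain ⟨d, hd, rfl⟩ := pvAdj_symm hadj
      exact b5 v hv hnc d hd ihc
  have key : (F.length = (start :: rest).length) ↔ (∀ c ∈ start :: rest, c ∈ S) := by
    rw [pv_len_eq_iff_superset a1 hund a2]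
    constructor <;> intro h c hc <;>
      [exact (hSreach c).mpr ((hFreach c).mp (h c hc));
       exact (hFreach c).mpr ((hSreach c).mp (h c hc))]
  rw [Bool.eq_iff_iff]
  simp only [beq_iff_eq, List.all_eq_true, List.contains_iff_mem]
  exact key

-- ===== VERDICT (by name: the statement is the Claim_ definition above) =====
theorem is_remaining_area_connected_spec : Claim_equal_is_remaining_area_connected := by
  intro board visited current_step found _
  unfold Spec_is_remaining_area_connected
  simp only [is_remaining_area_connected, is_remaining_area_connected_alt]
  have hk : (PySem.Dict.ofList
      (board.map (fun t => ((t.1, t.2.1, t.2.2.1), t.2.2.2)))).keys.Nodup :=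
    PySem.Dict.nodup_keys_ofList _
  cases hcase : pvUsable (PySem.Dict.ofList
      (board.map (fun t => ((t.1, t.2.1, t.2.2.1), t.2.2.2)))) visited current_step found with
  | nil => rfl
  | cons start rest =>
    have hund : (start :: rest).Nodup := by
      rw [← hcase]; exact pv_usable_nodup _ visited current_step found hk
    have hkeys : ∀ c ∈ start :: rest,
        (PySem.Dict.ofList
          (board.map (fun t => ((t.1, t.2.1, t.2.2.1), t.2.2.2)))).contains c = true := by
      intro c hc
      exact pv_usable_mem_keys (hcase ▸ hc)
    exact pv_cons_eq _ start rest hund hkeys
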